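-- pv_equiv track=rewrite | github.com/GrabowMar/ThesisAppRework | src/app/engines/base.py | normalize_severity
-- ===== SOURCE A (Python) =====
-- from enum import Enum
-- from typing import Any, Dict, List, Optional, Set, Tuple
--
-- class Severity(str, Enum):
--     """Universal issue severity levels."""
--     CRITICAL = "critical"
--     HIGH = "high"
--     MEDIUM = "medium"
--     LOW = "low"
--     INFO = "info"
--     UNKNOWN = "unknown"
--
-- def normalize_severity(value: Any) -> str:
--     """Normalize severity value to universal standard format."""
--     if value is None:
--         return Severity.UNKNOWN.value
--
--     # Convert to string and normalize
--     value_str = str(value).lower().strip()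
--
--     # Handle numeric values with simple mapping
--     if value_str.isdigit():
--         num_val = int(value_str)
--         if num_val >= 4:
--             return Severity.CRITICAL.value
--         elif num_val == 3:
--             return Severity.HIGH.value
--         elif num_val == 2:
--             return Severity.MEDIUM.value
--         elif num_val == 1:
--             return Severity.LOW.value
--         else:
--             return Severity.INFO.value
--
--     # Universal string mapping - accept any input, normalize to standard levels
--     if any(word in value_str for word in ['critical', 'fatal', 'severe']):
--         return Severity.CRITICAL.value
--     elif any(word in value_str for word in ['high', 'error', 'major']):
--         return Severity.HIGH.value
--     elif any(word in value_str for word in ['medium', 'warn', 'warning', 'moderate']):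
--         return Severity.MEDIUM.value
--     elif any(word in value_str for word in ['low', 'minor', 'style']):
--         return Severity.LOW.value
--     elif any(word in value_str for word in ['info', 'note', 'informational']):
--         return Severity.INFO.value
--
--     # Return as-is if it's already a valid severity, otherwise unknown
--     valid_severities = {s.value for s in Severity}
--     return value_str if value_str in valid_severities else Severity.UNKNOWN.value
-- ===== SOURCE B (Python) =====
-- # B: single-pass min-rank aggregation over a flat keyword->rank map instead of an
-- # ordered early-return chain; numeric index computed arithmetically; the final
-- # valid-severity membership test is dropped because every valid severity except
-- # "unknown" already contains itself as a keyword.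
-- _RANK = {
--     "critical": 0, "fatal": 0, "severe": 0,
--     "high": 1, "error": 1, "major": 1,
--     "medium": 2, "warn": 2, "warning": 2, "moderate": 2,
--     "low": 3, "minor": 3, "style": 3,
--     "info": 4, "note": 4, "informational": 4,
-- }
-- _LEVELS = ["critical", "high", "medium", "low", "info"]
--
--
-- def normalize_severity(value):
--     """Normalize severity value to universal standard format."""
--     if value is None:
--         return "unknown"
--     s = str(value).lower().strip()
--     if s.isdigit():
--         return _LEVELS[4 - min(int(s), 4)]
--     ranks = [r for w, r in _RANK.items() if w in s]
--     return _LEVELS[min(ranks)] if ranks else "unknown"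
-- ===== Notes on version B (the rewrite author's own statement) =====
-- stated objective: alternative
-- what changed: B aggregates: it collects the ranks of all matching keywords from one flat keyword-to-rank map and returns the level of the minimum rank (no ordered early-return chain), computes the numeric index arithmetically as 4-min(n,4), and drops A's final valid-severity membership test entirely since every valid severity other than 'unknown' contains itself as a keyword.
import Mathlib
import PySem

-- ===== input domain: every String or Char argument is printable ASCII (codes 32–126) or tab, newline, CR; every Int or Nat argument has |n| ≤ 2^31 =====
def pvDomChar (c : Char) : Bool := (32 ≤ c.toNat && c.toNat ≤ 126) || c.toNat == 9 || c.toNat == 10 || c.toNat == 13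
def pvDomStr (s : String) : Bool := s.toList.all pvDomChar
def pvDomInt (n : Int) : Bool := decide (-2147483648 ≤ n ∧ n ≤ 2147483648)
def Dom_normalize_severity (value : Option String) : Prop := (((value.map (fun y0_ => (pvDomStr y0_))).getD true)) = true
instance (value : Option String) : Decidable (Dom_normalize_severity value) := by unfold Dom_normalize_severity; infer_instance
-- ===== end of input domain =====

-- B replaces A's ordered early-return keyword chain by a min-rank aggregation over one flat
-- keyword->rank map, computes the numeric index arithmetically, and drops A's final
-- valid-severity membership test (every valid severity except "unknown" contains itself
-- as a keyword); objective: alternative.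

-- ===== PORT A =====
def normalize_severity (value : Option String) : String :=
  match value with
  | none => "unknown"
  | some v =>
    let value_str := PySem.Str.strip (PySem.Str.lower v)
    if PySem.Str.strIsdigit value_str then
      -- int(value_str) cannot raise here (isdigit guard), so getD 0 is never the default
      let num_val := (PySem.Int.ofStr? value_str).getD 0
      if num_val ≥ 4 then "critical"
      else if num_val = 3 then "high"
      else if num_val = 2 then "medium"
      else if num_val = 1 then "low"
      else "info"
    else if ["critical", "fatal", "severe"].any (fun w => PySem.Str.isIn w value_str) then "critical"
    else if ["high", "error", "major"].any (fun w => PySem.Str.isIn w value_str) then "high"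
    else if ["medium", "warn", "warning", "moderate"].any (fun w => PySem.Str.isIn w value_str) then "medium"
    else if ["low", "minor", "style"].any (fun w => PySem.Str.isIn w value_str) then "low"
    else if ["info", "note", "informational"].any (fun w => PySem.Str.isIn w value_str) then "info"
    else if ["critical", "high", "medium", "low", "info", "unknown"].contains value_str then value_str
    else "unknown"

-- ===== PORT B =====
-- the _RANK dict of Source B (a PySem.Dict is its association list; .items() is the list itself)
def pvRank : List (String × Int) :=
  [("critical", 0), ("fatal", 0), ("severe", 0),
   ("high", 1), ("error", 1), ("major", 1),
   ("medium", 2), ("warn", 2), ("warning", 2), ("moderate", 2),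
   ("low", 3), ("minor", 3), ("style", 3),
   ("info", 4), ("note", 4), ("informational", 4)]

def pvLevels : List String := ["critical", "high", "medium", "low", "info"]

-- the comprehension 'ranks = [r for w, r in _RANK.items() if w in s]'
def pvRanks (s : String) : List Int :=
  (pvRank.filter (fun p => PySem.Str.isIn p.1 s)).map (fun p => p.2)

def normalize_severity_alt (value : Option String) : String :=
  match value with
  | none => "unknown"
  | some v =>
    let s := PySem.Str.strip (PySem.Str.lower v)
    if PySem.Str.strIsdigit s then
      -- _LEVELS[4 - min(int(s), 4)]: index is in range, so getD "unknown" is never the default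
      (PySem.List.pyGet? pvLevels (4 - min ((PySem.Int.ofStr? s).getD 0) 4)).getD "unknown"
    else
      -- '_LEVELS[min(ranks)] if ranks else "unknown"'
      match PySem.List.min? (pvRanks s) (fun x => x) with
      | some r => (PySem.List.pyGet? pvLevels r).getD "unknown"
      | none => "unknown"

-- ===== PRECONDITION & SPEC =====
def Spec_normalize_severity (value : Option String) (out : String) : Prop := out = normalize_severity_alt value
instance (value : Option String) (out : String) : Decidable (Spec_normalize_severity value out) := by unfold Spec_normalize_severity; infer_instance

-- ===== CLAIM =====
def Claim_equal_normalize_severity : Prop := ∀ (value : Option String), Dom_normalize_severity value → Spec_normalize_severity value (normalize_severity value)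

-- ===== LEMMAS AND PROOFS =====

theorem dropWhile_eq_self_of_all {p : Char → Bool} {l : List Char}
    (h : ∀ x ∈ l, p x = false) : l.dropWhile p = l := by
  cases l with
  | nil => rfl
  | cons a t => simp [h a (by simp)]

theorem opt_nonneg (o : Option Nat) :
    0 ≤ (Option.map (fun (n : Int) => n) (o >>= fun a => pure ((a : Int)))).getD 0 := by
  cases o <;> simp

theorem ofChars?_nonneg (cs : List Char) (h : PySem.Chars.strIsdigit cs = true) :
    0 ≤ (PySem.Int.ofChars? cs).getD 0 := by
  simp only [PySem.Chars.strIsdigit, Bool.and_eq_true, List.all_eq_true, Bool.not_eq_true',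
    List.isEmpty_eq_false_iff] at h
  obtain ⟨hne, hall⟩ := h
  have hsp : ∀ x ∈ cs, PySem.Int.isIntSpace x = false := by
    intro x hx
    have hd : PySem.Chars.isdigit x = true := hall x hx
    simp only [PySem.Chars.isdigit, Bool.and_eq_true, decide_eq_true_eq, Char.le_def,
      UInt32.le_iff_toBitVec_le] at hd
    simp only [PySem.Int.isIntSpace, Bool.or_eq_false_iff, decide_eq_false_iff_not]
    refine ⟨⟨⟨⟨⟨?_, ?_⟩, ?_⟩, ?_⟩, ?_⟩, ?_⟩ <;> (rintro rfl; revert hd; decide)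
  have h1 : cs.dropWhile PySem.Int.isIntSpace = cs := dropWhile_eq_self_of_all hsp
  have h2 : cs.reverse.dropWhile PySem.Int.isIntSpace = cs.reverse :=
    dropWhile_eq_self_of_all (by simpa using hsp)
  unfold PySem.Int.ofChars?
  rw [h1, h2, List.reverse_reverse]
  cases cs with
  | nil => exact absurd rfl hne
  | cons c rest =>
    have hc : PySem.Chars.isdigit c = true := hall c (by simp)
    dsimp only
    split
    · rename_i ds heq
      rw [List.cons_eq_cons] at heq
      obtain ⟨rfl, -⟩ := heq
      exact absurd hc (by decide)
    · rename_i ds heq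
      rw [List.cons_eq_cons] at heq
      obtain ⟨rfl, -⟩ := heq
      exact absurd hc (by decide)
    · exact opt_nonneg _

theorem ofStr?_nonneg (s : String) (h : PySem.Str.strIsdigit s = true) :
    0 ≤ (PySem.Int.ofStr? s).getD 0 := by
  have h' : PySem.Chars.strIsdigit s.toList = true := by simpa using h
  have := ofChars?_nonneg s.toList h'
  simpa [PySem.Int.ofStr?] using this

-- A's threshold ladder equals B's arithmetic lookup on nonnegative integers
theorem ladder_eq_lookup (n : Int) (hn : 0 ≤ n) :
    (if n ≥ 4 then "critical"
     else if n = 3 then "high"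
     else if n = 2 then "medium"
     else if n = 1 then "low"
     else "info")
    = (PySem.List.pyGet? pvLevels (4 - min n 4)).getD "unknown" := by
  by_cases h4 : 4 ≤ n
  · have : min n 4 = 4 := by omega
    rw [this]
    simp [h4]
    decide
  · have hlt : n < 4 := by omega
    have : min n 4 = n := by omega
    rw [this]
    interval_cases n <;> decide

-- min over a list that contains k and is bounded below by k is k
theorem min?_eq_some_of (l : List Int) (k : Int) (hmem : k ∈ l)
    (hlb : ∀ x ∈ l, k ≤ x) : PySem.List.min? l (fun x => x) = some k := by
  cases h : PySem.List.min? l (fun x => x) with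
  | none =>
    rw [PySem.List.min?_eq_none_iff] at h
    subst h
    simp at hmem
  | some m =>
    have h1 : m ∈ l := PySem.List.min?_mem h
    have h2 : m ≤ k := by simpa using PySem.List.min?_isMin h k hmem
    have h3 : k ≤ m := hlb m h1
    exact congrArg some (by omega)

theorem mem_pvRanks (s : String) (p : String × Int) (hp : p ∈ pvRank)
    (hf : PySem.Str.isIn p.1 s = true) : p.2 ∈ pvRanks s :=
  List.mem_map.mpr ⟨p, List.mem_filter.mpr ⟨hp, hf⟩, rfl⟩

theorem pvRanks_lb (s : String) (k : Int)
    (h : ∀ p ∈ pvRank, PySem.Str.isIn p.1 s = true → k ≤ p.2) :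
    ∀ x ∈ pvRanks s, k ≤ x := by
  intro x hx
  simp only [pvRanks, List.mem_map, List.mem_filter] at hx
  obtain ⟨p, ⟨hp, hf⟩, rfl⟩ := hx
  exact h p hp hf

-- the shared body after the None guard and str/lower/strip normalization
theorem body_eq (s : String) :
    (if PySem.Str.strIsdigit s then
       (let num_val := (PySem.Int.ofStr? s).getD 0
        if num_val ≥ 4 then "critical"
        else if num_val = 3 then "high"
        else if num_val = 2 then "medium"
        else if num_val = 1 then "low"
        else "info")
     else if ["critical", "fatal", "severe"].any (fun w => PySem.Str.isIn w s) then "critical"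
     else if ["high", "error", "major"].any (fun w => PySem.Str.isIn w s) then "high"
     else if ["medium", "warn", "warning", "moderate"].any (fun w => PySem.Str.isIn w s) then "medium"
     else if ["low", "minor", "style"].any (fun w => PySem.Str.isIn w s) then "low"
     else if ["info", "note", "informational"].any (fun w => PySem.Str.isIn w s) then "info"
     else if ["critical", "high", "medium", "low", "info", "unknown"].contains s then s
     else "unknown")
    = (if PySem.Str.strIsdigit s then
         (PySem.List.pyGet? pvLevels (4 - min ((PySem.Int.ofStr? s).getD 0) 4)).getD "unknown"
       else
         match PySem.List.min? (pvRanks s) (fun x => x) with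
         | some r => (PySem.List.pyGet? pvLevels r).getD "unknown"
         | none => "unknown") := by
  by_cases hd : PySem.Str.strIsdigit s = true
  · rw [if_pos hd, if_pos hd]
    exact ladder_eq_lookup _ (ofStr?_nonneg _ hd)
  · rw [if_neg hd, if_neg hd]
    by_cases h0 : (["critical", "fatal", "severe"].any (fun w => PySem.Str.isIn w s)) = true
    · rw [if_pos h0]
      have hmem : (0 : Int) ∈ pvRanks s := by
        simp only [List.any_cons, List.any_nil, Bool.or_eq_true, Bool.or_false] at h0
        rcases h0 with h | h | h
        · exact mem_pvRanks s ("critical", 0) (by decide) h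
        · exact mem_pvRanks s ("fatal", 0) (by decide) h
        · exact mem_pvRanks s ("severe", 0) (by decide) h
      have hlb : ∀ x ∈ pvRanks s, (0 : Int) ≤ x :=
        pvRanks_lb s 0 (by intro p hp _; fin_cases hp <;> simp)
      rw [min?_eq_some_of _ _ hmem hlb]
      rfl
    · rw [if_neg h0]
      simp only [List.any_cons, List.any_nil, Bool.or_eq_true, Bool.or_false, not_or] at h0
      obtain ⟨e0a, e0b, e0c⟩ := h0
      by_cases h1 : (["high", "error", "major"].any (fun w => PySem.Str.isIn w s)) = true
      · rw [if_pos h1]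
        have hmem : (1 : Int) ∈ pvRanks s := by
          simp only [List.any_cons, List.any_nil, Bool.or_eq_true, Bool.or_false] at h1
          rcases h1 with h | h | h
          · exact mem_pvRanks s ("high", 1) (by decide) h
          · exact mem_pvRanks s ("error", 1) (by decide) h
          · exact mem_pvRanks s ("major", 1) (by decide) h
        have hlb : ∀ x ∈ pvRanks s, (1 : Int) ≤ x :=
          pvRanks_lb s 1 (by intro p hp hf; fin_cases hp <;> simp_all)
        rw [min?_eq_some_of _ _ hmem hlb]
        rfl
      · rw [if_neg h1]
        simp only [List.any_cons, List.any_nil, Bool.or_eq_true, Bool.or_false, not_or] at h1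
        obtain ⟨e1a, e1b, e1c⟩ := h1
        by_cases h2 : (["medium", "warn", "warning", "moderate"].any (fun w => PySem.Str.isIn w s)) = true
        · rw [if_pos h2]
          have hmem : (2 : Int) ∈ pvRanks s := by
            simp only [List.any_cons, List.any_nil, Bool.or_eq_true, Bool.or_false] at h2
            rcases h2 with h | h | h | h
            · exact mem_pvRanks s ("medium", 2) (by decide) h
            · exact mem_pvRanks s ("warn", 2) (by decide) h
            · exact mem_pvRanks s ("warning", 2) (by decide) h
            · exact mem_pvRanks s ("moderate", 2) (by decide) h
          have hlb : ∀ x ∈ pvRanks s, (2 : Int) ≤ x :=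
            pvRanks_lb s 2 (by intro p hp hf; fin_cases hp <;> simp_all)
          rw [min?_eq_some_of _ _ hmem hlb]
          rfl
        · rw [if_neg h2]
          simp only [List.any_cons, List.any_nil, Bool.or_eq_true, Bool.or_false, not_or] at h2
          obtain ⟨e2a, e2b, e2c, e2d⟩ := h2
          by_cases h3 : (["low", "minor", "style"].any (fun w => PySem.Str.isIn w s)) = true
          · rw [if_pos h3]
            have hmem : (3 : Int) ∈ pvRanks s := by
              simp only [List.any_cons, List.any_nil, Bool.or_eq_true, Bool.or_false] at h3
              rcases h3 with h | h | h
              · exact mem_pvRanks s ("low", 3) (by decide) h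
              · exact mem_pvRanks s ("minor", 3) (by decide) h
              · exact mem_pvRanks s ("style", 3) (by decide) h
            have hlb : ∀ x ∈ pvRanks s, (3 : Int) ≤ x :=
              pvRanks_lb s 3 (by intro p hp hf; fin_cases hp <;> simp_all)
            rw [min?_eq_some_of _ _ hmem hlb]
            rfl
          · rw [if_neg h3]
            simp only [List.any_cons, List.any_nil, Bool.or_eq_true, Bool.or_false, not_or] at h3
            obtain ⟨e3a, e3b, e3c⟩ := h3
            by_cases h4 : (["info", "note", "informational"].any (fun w => PySem.Str.isIn w s)) = true
            · rw [if_pos h4]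
              have hmem : (4 : Int) ∈ pvRanks s := by
                simp only [List.any_cons, List.any_nil, Bool.or_eq_true, Bool.or_false] at h4
                rcases h4 with h | h | h
                · exact mem_pvRanks s ("info", 4) (by decide) h
                · exact mem_pvRanks s ("note", 4) (by decide) h
                · exact mem_pvRanks s ("informational", 4) (by decide) h
              have hlb : ∀ x ∈ pvRanks s, (4 : Int) ≤ x :=
                pvRanks_lb s 4 (by intro p hp hf; fin_cases hp <;> simp_all)
              rw [min?_eq_some_of _ _ hmem hlb]
              rfl
            · rw [if_neg h4]
              simp only [List.any_cons, List.any_nil, Bool.or_eq_true, Bool.or_false, not_or] at h4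
              obtain ⟨e4a, e4b, e4c⟩ := h4
              have hnil : pvRanks s = [] := by
                have : pvRank.filter (fun p => PySem.Str.isIn p.1 s) = [] := by
                  rw [List.filter_eq_nil_iff]
                  intro p hp
                  fin_cases hp <;> simp_all
                unfold pvRanks
                rw [this]
                rfl
              rw [hnil]
              have hmin : PySem.List.min? ([] : List Int) (fun x => x) = none :=
                (PySem.List.min?_eq_none_iff _ _).mpr rfl
              rw [hmin]
              by_cases hc : (["critical", "high", "medium", "low", "info", "unknown"].contains s) = true
              · rw [if_pos hc]
                simp only [List.contains_eq_mem, List.mem_cons, List.not_mem_nil, or_false,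
                  decide_eq_true_eq] at hc
                rcases hc with rfl | rfl | rfl | rfl | rfl | rfl
                · exact absurd (by decide) (by exact fun h => by simp_all : PySem.Str.isIn "critical" "critical" = true → False)
                · exact absurd (by decide) (fun h => by simp_all : PySem.Str.isIn "high" "high" = true → False)
                · exact absurd (by decide) (fun h => by simp_all : PySem.Str.isIn "medium" "medium" = true → False)
                · exact absurd (by decide) (fun h => by simp_all : PySem.Str.isIn "low" "low" = true → False)
                · exact absurd (by decide) (fun h => by simp_all : PySem.Str.isIn "info" "info" = true → False)
                · rfl
              · rw [if_neg hc]

-- ===== VERDICT =====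
theorem normalize_severity_spec : Claim_equal_normalize_severity := by
  intro value _
  unfold Spec_normalize_severity
  cases value with
  | none => rfl
  | some v => exact body_eq (PySem.Str.strip (PySem.Str.lower v))
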